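-- pv_equiv track=rewrite | github.com/sunflower-odd/tasks | algo/algo5/5_2/formatted.py | has_closed_contour
-- ===== SOURCE A (Python) =====
-- from collections import deque
--
-- def has_closed_contour(matrix):
--     n, m = len(matrix), len(matrix[0])
--     visited = [[False] * m for _ in range(n)]
--     directions = [(-1,0),(1,0),(0,-1),(0,1), (-1,-1), (-1,1), (1,-1), (1,1)]
--
--     queue = deque()
--     for i in range(n):
--         for j in [0, m-1]:
--             if matrix[i][j] == 0 and not visited[i][j]:
--                 queue.append((i,j))
--                 visited[i][j] = True
--     for j in range(m):
--         for i in [0, n-1]: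
--             if matrix[i][j] == 0 and not visited[i][j]:
--                 queue.append((i,j))
--                 visited[i][j] = True
--
--     while queue:
--         x, y = queue.popleft()
--         for dx, dy in directions:
--             nx, ny = x+dx, y+dy
--             if 0 <= nx < n and 0 <= ny < m and matrix[nx][ny] == 0 and not visited[nx][ny]:
--                 visited[nx][ny] = True
--                 queue.append((nx, ny))
--
--     # Если есть нули, к которым мы не смогли пройти → замкнутый контур
--     for i in range(n):
--         for j in range(m):
--             if matrix[i][j] == 0 and not visited[i][j]:
--                 return "YES"
--
--     return "NO"
-- ===== SOURCE B (Python) =====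
-- def has_closed_contour(matrix):
--     # Fixed-point closure instead of BFS: grow the set of border-connected zeros
--     # by neighbor expansion until stable (n*m rounds suffice), then scan.
--     n, m = len(matrix), len(matrix[0])
--     reached = set()
--     for i in range(n):
--         for j in range(m):
--             if matrix[i][j] == 0 and (i == 0 or i == n - 1 or j == 0 or j == m - 1):
--                 reached.add((i, j))
--     for _ in range(n * m):
--         new = set(reached)
--         for (i, j) in reached:
--             for di in (-1, 0, 1):
--                 for dj in (-1, 0, 1):
--                     ni, nj = i + di, j + dj
--                     if 0 <= ni < n and 0 <= nj < m and matrix[ni][nj] == 0: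
--                         new.add((ni, nj))
--         reached = new
--     for i in range(n):
--         for j in range(m):
--             if matrix[i][j] == 0 and (i, j) not in reached:
--                 return "YES"
--     return "NO"
-- ===== Notes on version B (the rewrite author's own statement) =====
-- stated objective: alternative
-- what changed: Replaces the deque-based border BFS flood fill by a round-based fixed-point closure: start from the set of border zeros and repeatedly add every in-range zero neighbor of an already-reached cell for n*m rounds (enough to reach the fixed point), then scan for a zero cell outside the closure.
import Mathlib
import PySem

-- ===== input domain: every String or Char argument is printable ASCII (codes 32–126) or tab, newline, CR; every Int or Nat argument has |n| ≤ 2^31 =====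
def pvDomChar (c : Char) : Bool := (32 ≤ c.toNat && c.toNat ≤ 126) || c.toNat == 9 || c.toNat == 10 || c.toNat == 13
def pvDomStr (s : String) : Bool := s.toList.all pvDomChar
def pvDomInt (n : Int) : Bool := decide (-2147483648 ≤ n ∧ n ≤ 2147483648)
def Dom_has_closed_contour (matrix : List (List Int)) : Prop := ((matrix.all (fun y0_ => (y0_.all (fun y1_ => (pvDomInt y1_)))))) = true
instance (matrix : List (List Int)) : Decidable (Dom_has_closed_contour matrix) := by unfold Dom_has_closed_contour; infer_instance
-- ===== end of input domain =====

-- B replaces A's deque BFS flood fill from the border by a fixed-point closure iteration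
-- (n*m rounds of neighbor expansion of the border-zero set); same answer, alternative algorithm.

-- ===== PORT A =====
-- Helpers shared by both ports: both Pythons read matrix[i][j] identically, walk the same i,j grid,
-- and end with the identical final scan loop. Every subscript performed under Pre_ is nonnegative and
-- in range, where List.getD is exactly Python's matrix[i][j].
def pvCell (matrix : List (List Int)) (i j : Int) : Int :=
  (matrix.getD i.toNat []).getD j.toNat 1

def pvGrid (n m : Int) : List (Int × Int) :=
  (PySem.List.pyRange 0 n 1).flatMap (fun i => (PySem.List.pyRange 0 m 1).map (fun j => (i, j)))

-- the final double loop of both Pythons: first zero cell not visited → "YES", else "NO"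
def pvScan (matrix : List (List Int)) (vis : PySem.Set (Int × Int)) : List (Int × Int) → String
  | [] => "NO"
  | p :: rest => if pvCell matrix p.1 p.2 = 0 ∧ p ∉ vis then "YES" else pvScan matrix vis rest

def pvAdirs : List (Int × Int) := [(-1,0),(1,0),(0,-1),(0,1),(-1,-1),(-1,1),(1,-1),(1,1)]

-- the two border-seeding loops of A: queue and visited receive exactly the same cells
def pvAseed (matrix : List (List Int)) (n m : Int) :
    List (Int × Int) × PySem.Set (Int × Int) :=
  let st1 := (PySem.List.pyRange 0 n 1).foldl (fun st i =>
    ([(0 : Int), m - 1]).foldl (fun st j =>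
      if pvCell matrix i j = 0 ∧ (i, j) ∉ st.2 then
        (st.1 ++ [(i, j)], PySem.Set.add st.2 (i, j))
      else st) st) ([], PySem.Set.empty)
  (PySem.List.pyRange 0 m 1).foldl (fun st j =>
    ([(0 : Int), n - 1]).foldl (fun st i =>
      if pvCell matrix i j = 0 ∧ (i, j) ∉ st.2 then
        (st.1 ++ [(i, j)], PySem.Set.add st.2 (i, j))
      else st) st) st1

-- A's "while queue" loop; fuel only guards totality (proved never to run out under Pre_)
def pvAbfs (matrix : List (List Int)) (n m : Int) :
    Nat → List (Int × Int) → PySem.Set (Int × Int) → PySem.Set (Int × Int)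
  | 0, _, vis => vis
  | _ + 1, [], vis => vis
  | fuel + 1, (x, y) :: rest, vis =>
      let st := pvAdirs.foldl (fun (st : List (Int × Int) × PySem.Set (Int × Int)) d =>
        if (0 ≤ x + d.1 ∧ x + d.1 < n ∧ 0 ≤ y + d.2 ∧ y + d.2 < m ∧
            pvCell matrix (x + d.1) (y + d.2) = 0) ∧ (x + d.1, y + d.2) ∉ st.2 then
          (st.1 ++ [(x + d.1, y + d.2)], PySem.Set.add st.2 (x + d.1, y + d.2))
        else st) (rest, vis)
      pvAbfs matrix n m fuel st.1 st.2

def has_closed_contour (matrix : List (List Int)) : String :=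
  let n : Int := matrix.length
  let m : Int := (matrix.headI).length
  let st := pvAseed matrix n m
  let vis := pvAbfs matrix n m (2 * (pvGrid n m).length + 1) st.1 st.2
  pvScan matrix vis (pvGrid n m)

-- ===== PORT B =====
def pvBdeltas : List (Int × Int) :=
  ([-1, 0, 1] : List Int).flatMap (fun di => ([-1, 0, 1] : List Int).map (fun dj => (di, dj)))

-- B's seeding pass: every zero cell on the border of the grid
def pvBseeds (matrix : List (List Int)) (n m : Int) : PySem.Set (Int × Int) :=
  (pvGrid n m).foldl (fun s p =>
    if pvCell matrix p.1 p.2 = 0 ∧ (p.1 = 0 ∨ p.1 = n - 1 ∨ p.2 = 0 ∨ p.2 = m - 1) then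
      PySem.Set.add s p
    else s) PySem.Set.empty

-- one round: new = copy of S, plus every in-range zero neighbor of a cell of S
def pvBstep (matrix : List (List Int)) (n m : Int) (S : PySem.Set (Int × Int)) :
    PySem.Set (Int × Int) :=
  S.foldl (fun acc p =>
    pvBdeltas.foldl (fun acc d =>
      if 0 ≤ p.1 + d.1 ∧ p.1 + d.1 < n ∧ 0 ≤ p.2 + d.2 ∧ p.2 + d.2 < m ∧
          pvCell matrix (p.1 + d.1) (p.2 + d.2) = 0 then
        PySem.Set.add acc (p.1 + d.1, p.2 + d.2)
      else acc) acc) S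

def pvBiter (matrix : List (List Int)) (n m : Int) :
    Nat → PySem.Set (Int × Int) → PySem.Set (Int × Int)
  | 0, S => S
  | k + 1, S => pvBiter matrix n m k (pvBstep matrix n m S)

def has_closed_contour_alt (matrix : List (List Int)) : String :=
  let n : Int := matrix.length
  let m : Int := (matrix.headI).length
  let reached := pvBiter matrix n m (n * m).toNat (pvBseeds matrix n m)
  pvScan matrix reached (pvGrid n m)

-- ===== PRECONDITION & SPEC =====
-- Pre_ excludes exactly the inputs where Python A raises IndexError: the empty matrix,
-- a matrix whose first row is empty, or one with a row shorter than the first row.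
def Pre_has_closed_contour (matrix : List (List Int)) : Prop :=
  matrix ≠ [] ∧ 0 < (matrix.headI).length ∧
    ∀ row ∈ matrix, (matrix.headI).length ≤ row.length
instance (matrix : List (List Int)) : Decidable (Pre_has_closed_contour matrix) := by
  unfold Pre_has_closed_contour; infer_instance

def pvWitness_has_closed_contour : List (List Int) := [[1, 1, 1], [1, 0, 1], [1, 1, 1]]

def Spec_has_closed_contour (matrix : List (List Int)) (out : String) : Prop :=
  out = has_closed_contour_alt matrix
instance (matrix : List (List Int)) (out : String) : Decidable (Spec_has_closed_contour matrix out) := by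
  unfold Spec_has_closed_contour; infer_instance

-- ===== CLAIM (what is proved, stated in full; the proofs are below) =====
def Claim_equal_has_closed_contour : Prop := ∀ (matrix : List (List Int)), Dom_has_closed_contour matrix → Pre_has_closed_contour matrix → Spec_has_closed_contour matrix (has_closed_contour matrix)

-- ===== LEMMAS AND PROOFS =====

-- ---------- abstract description of what both programs compute ----------

-- in-range zero cell
def pvOk (matrix : List (List Int)) (n m : Int) (p : Int × Int) : Prop :=
  0 ≤ p.1 ∧ p.1 < n ∧ 0 ≤ p.2 ∧ p.2 < m ∧ pvCell matrix p.1 p.2 = 0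

-- zero cell on the border
def pvSeedP (matrix : List (List Int)) (n m : Int) (p : Int × Int) : Prop :=
  pvOk matrix n m p ∧ (p.1 = 0 ∨ p.1 = n - 1 ∨ p.2 = 0 ∨ p.2 = m - 1)

-- one 8-neighbor move onto an in-range zero cell
def pvAdj (matrix : List (List Int)) (n m : Int) (p q : Int × Int) : Prop :=
  pvOk matrix n m q ∧ (q.1 - p.1, q.2 - p.2) ∈ pvAdirs

-- zero cell connected to the border through zero cells
def pvReach (matrix : List (List Int)) (n m : Int) (p : Int × Int) : Prop :=
  ∃ s, pvSeedP matrix n m s ∧ Relation.ReflTransGen (pvAdj matrix n m) s p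

lemma mem_pvGrid (n m : Int) (p : Int × Int) :
    p ∈ pvGrid n m ↔ 0 ≤ p.1 ∧ p.1 < n ∧ 0 ≤ p.2 ∧ p.2 < m := by
  obtain ⟨i, j⟩ := p
  simp [pvGrid, PySem.List.mem_pyRange_one]
  aesop

lemma length_pvGrid (a b : Nat) : (pvGrid (a : Int) (b : Int)).length = a * b := by
  simp [pvGrid, PySem.List.pyRange_zero_natCast, List.length_flatMap, List.map_map,
    Function.comp_def, List.map_const']

lemma pv_vis_le (matrix : List (List Int)) (n m : Int) (vis : PySem.Set (Int × Int))
    (hnd : vis.Nodup) (hok : ∀ p ∈ vis, pvOk matrix n m p) :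
    vis.length ≤ (pvGrid n m).length :=
  (List.subperm_of_subset hnd fun p hp => (mem_pvGrid n m p).2
    ⟨(hok p hp).1, (hok p hp).2.1, (hok p hp).2.2.1, (hok p hp).2.2.2.1⟩).length_le

lemma mem_pvAdirs_iff (d : Int × Int) :
    d ∈ pvAdirs ↔ (-1 ≤ d.1 ∧ d.1 ≤ 1 ∧ -1 ≤ d.2 ∧ d.2 ≤ 1 ∧ ¬(d.1 = 0 ∧ d.2 = 0)) := by
  obtain ⟨x, y⟩ := d
  simp [pvAdirs, Prod.ext_iff]
  omega

lemma mem_pvBdeltas_iff (d : Int × Int) :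
    d ∈ pvBdeltas ↔ (-1 ≤ d.1 ∧ d.1 ≤ 1 ∧ -1 ≤ d.2 ∧ d.2 ≤ 1) := by
  obtain ⟨x, y⟩ := d
  simp [pvBdeltas, Prod.ext_iff]
  omega

-- ---------- generic spec of A's conditional append-and-mark loops ----------

def pvPS (g : (List (Int × Int) × PySem.Set (Int × Int)) → (List (Int × Int) × PySem.Set (Int × Int)))
    (Q : Int × Int → Prop) : Prop :=
  ∀ st, st.2.Nodup →
    ∃ e, g st = (st.1 ++ e, st.2 ++ e) ∧ (st.2 ++ e).Nodup ∧
      ∀ z, z ∈ st.2 ++ e ↔ z ∈ st.2 ∨ Q z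

lemma pvPS_step (C : Prop) [Decidable C] (h : Int × Int) :
    pvPS (fun st => if C ∧ h ∉ st.2 then (st.1 ++ [h], PySem.Set.add st.2 h) else st)
      (fun z => C ∧ z = h) := by
  intro st hnd
  by_cases hC : C
  · by_cases hm : h ∈ st.2
    · exact ⟨[], by simp [hm], by simpa using hnd, by aesop⟩
    · refine ⟨[h], ?_, ?_, ?_⟩
      · simp [hC, hm]
      · rw [← PySem.Set.add_of_not_mem hm]; exact PySem.Set.nodup_add _ _ hnd
      · intro z; simp [hC]
  · exact ⟨[], by simp [hC], by simpa using hnd, by aesop⟩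

lemma pvPS_congr {g : (List (Int × Int) × PySem.Set (Int × Int)) → (List (Int × Int) × PySem.Set (Int × Int))}
    {Q Q' : Int × Int → Prop} (hQ : ∀ z, Q z ↔ Q' z) (hg : pvPS g Q) : pvPS g Q' := by
  intro st hnd
  obtain ⟨e, h1, h2, h3⟩ := hg st hnd
  exact ⟨e, h1, h2, fun z => by rw [h3 z, hQ z]⟩

lemma pvPS_comp {g1 g2 : (List (Int × Int) × PySem.Set (Int × Int)) → (List (Int × Int) × PySem.Set (Int × Int))}
    {Q1 Q2 : Int × Int → Prop} (h1 : pvPS g1 Q1) (h2 : pvPS g2 Q2) :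
    pvPS (fun st => g2 (g1 st)) (fun z => Q1 z ∨ Q2 z) := by
  intro st hnd
  obtain ⟨e1, he1, hn1, hm1⟩ := h1 st hnd
  obtain ⟨e2, he2, hn2, hm2⟩ := h2 (st.1 ++ e1, st.2 ++ e1) hn1
  refine ⟨e1 ++ e2, ?_, ?_, ?_⟩
  · simp only [he1, he2, List.append_assoc]
  · simpa [List.append_assoc] using hn2
  · intro z
    have := hm2 z
    have := hm1 z
    simp only [List.append_assoc] at *
    tauto

lemma pvPS_foldl {α : Type} (g : (List (Int × Int) × PySem.Set (Int × Int)) → α → (List (Int × Int) × PySem.Set (Int × Int)))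
    (Q : α → Int × Int → Prop) (hg : ∀ x, pvPS (fun st => g st x) (Q x)) :
    ∀ l : List α, pvPS (fun st => l.foldl g st) (fun z => ∃ x ∈ l, Q x z) := by
  intro l
  induction l with
  | nil =>
      intro st hnd
      exact ⟨[], by simp, by simpa using hnd, by simp⟩
  | cons x xs ih =>
      have := pvPS_comp (hg x) ih
      refine pvPS_congr ?_ this
      intro z; simp

-- ---------- generic spec of B's conditional set-add loops ----------

def pvSS (g : PySem.Set (Int × Int) → PySem.Set (Int × Int)) (Q : Int × Int → Prop) : Prop :=
  ∀ s, s.Nodup → ∃ e, g s = s ++ e ∧ (s ++ e).Nodup ∧ ∀ z, z ∈ s ++ e ↔ z ∈ s ∨ Q z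

lemma pvSS_step (C : Prop) [Decidable C] (h : Int × Int) :
    pvSS (fun s => if C then PySem.Set.add s h else s) (fun z => C ∧ z = h) := by
  intro s hnd
  by_cases hC : C
  · by_cases hm : h ∈ s
    · exact ⟨[], by simp [hC, hm], by simpa using hnd, by aesop⟩
    · refine ⟨[h], ?_, ?_, ?_⟩
      · simp [hC, PySem.Set.add_of_not_mem hm]
      · rw [← PySem.Set.add_of_not_mem hm]; exact PySem.Set.nodup_add _ _ hnd
      · intro z; simp [hC]
  · exact ⟨[], by simp [hC], by simpa using hnd, by aesop⟩

lemma pvSS_congr {g : PySem.Set (Int × Int) → PySem.Set (Int × Int)} {Q Q' : Int × Int → Prop}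
    (hQ : ∀ z, Q z ↔ Q' z) (hg : pvSS g Q) : pvSS g Q' := by
  intro s hnd
  obtain ⟨e, h1, h2, h3⟩ := hg s hnd
  exact ⟨e, h1, h2, fun z => by rw [h3 z, hQ z]⟩

lemma pvSS_comp {g1 g2 : PySem.Set (Int × Int) → PySem.Set (Int × Int)} {Q1 Q2 : Int × Int → Prop}
    (h1 : pvSS g1 Q1) (h2 : pvSS g2 Q2) : pvSS (fun s => g2 (g1 s)) (fun z => Q1 z ∨ Q2 z) := by
  intro s hnd
  obtain ⟨e1, he1, hn1, hm1⟩ := h1 s hnd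
  obtain ⟨e2, he2, hn2, hm2⟩ := h2 (s ++ e1) hn1
  refine ⟨e1 ++ e2, ?_, ?_, ?_⟩
  · simp only [he1, he2, List.append_assoc]
  · simpa [List.append_assoc] using hn2
  · intro z
    have := hm2 z
    have := hm1 z
    simp only [List.append_assoc] at *
    tauto

lemma pvSS_foldl {α : Type} (g : PySem.Set (Int × Int) → α → PySem.Set (Int × Int))
    (Q : α → Int × Int → Prop) (hg : ∀ x, pvSS (fun s => g s x) (Q x)) :
    ∀ l : List α, pvSS (fun s => l.foldl g s) (fun z => ∃ x ∈ l, Q x z) := by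
  intro l
  induction l with
  | nil =>
      intro s hnd
      exact ⟨[], by simp, by simpa using hnd, by simp⟩
  | cons x xs ih =>
      have := pvSS_comp (hg x) ih
      refine pvSS_congr ?_ this
      intro z; simp

-- ---------- A's seeding ----------

lemma pvAseed_char (matrix : List (List Int)) (n m : Int) (hn : 0 < n) (hm : 0 < m) :
    ∃ v : PySem.Set (Int × Int), pvAseed matrix n m = (v, v) ∧ v.Nodup ∧
      ∀ z, z ∈ v ↔ pvSeedP matrix n m z := by
  have h1 := pvPS_foldl
    (fun st i => ([(0 : Int), m - 1]).foldl (fun st j =>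
      if pvCell matrix i j = 0 ∧ (i, j) ∉ st.2 then
        (st.1 ++ [(i, j)], PySem.Set.add st.2 (i, j))
      else st) st)
    (fun i z => ∃ j ∈ [(0 : Int), m - 1], pvCell matrix i j = 0 ∧ z = (i, j))
    (fun i => pvPS_foldl _ (fun j z => pvCell matrix i j = 0 ∧ z = (i, j))
      (fun j => pvPS_step _ _) ([(0 : Int), m - 1]))
    (PySem.List.pyRange 0 n 1)
  have h2 := pvPS_foldl
    (fun st j => ([(0 : Int), n - 1]).foldl (fun st i =>
      if pvCell matrix i j = 0 ∧ (i, j) ∉ st.2 then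
        (st.1 ++ [(i, j)], PySem.Set.add st.2 (i, j))
      else st) st)
    (fun j z => ∃ i ∈ [(0 : Int), n - 1], pvCell matrix i j = 0 ∧ z = (i, j))
    (fun j => pvPS_foldl _ (fun i z => pvCell matrix i j = 0 ∧ z = (i, j))
      (fun i => pvPS_step _ _) ([(0 : Int), n - 1]))
    (PySem.List.pyRange 0 m 1)
  obtain ⟨e1, he1, hn1, hm1⟩ := h1 ([], PySem.Set.empty) (by simp [PySem.Set.empty])
  simp only [PySem.Set.empty, List.nil_append, List.not_mem_nil, false_or] at he1 hn1 hm1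
  obtain ⟨e2, he2, hn2, hm2⟩ := h2 (e1, e1) hn1
  simp only at he2 hn2 hm2
  refine ⟨e1 ++ e2, ?_, hn2, fun z => ?_⟩
  · simp only [pvAseed, PySem.Set.empty]
    rw [he1, he2]
  · rw [hm2 z]
    rw [hm1 z]
    simp only [List.mem_cons, PySem.List.mem_pyRange_one]
    obtain ⟨z1, z2⟩ := z
    constructor
    · rintro ((⟨i, hi, j, hj, hc, he⟩ | ⟨j, hj, i, hi, hc, he⟩)) <;>
      · rw [Prod.ext_iff] at he
        simp only at he hc
        obtain ⟨rfl, rfl⟩ := he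
        simp only [List.not_mem_nil, or_false] at hi hj
        exact ⟨⟨by omega, by omega, by omega, by omega, hc⟩, by omega⟩
    · rintro ⟨⟨hb1, hb2, hb3, hb4, hc⟩, hb⟩
      simp only at hb1 hb2 hb3 hb4 hc hb
      rcases hb with h | h | h | h
      · right; exact ⟨z2, ⟨by omega, by omega⟩, z1, by simp [h], by simpa using hc, rfl⟩
      · right; exact ⟨z2, ⟨by omega, by omega⟩, z1, by simp [h], by simpa using hc, rfl⟩
      · left; exact ⟨z1, ⟨by omega, by omega⟩, z2, by simp [h], by simpa using hc, rfl⟩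
      · left; exact ⟨z1, ⟨by omega, by omega⟩, z2, by simp [h], by simpa using hc, rfl⟩

-- ---------- A's BFS ----------

lemma pvAdjFrom_iff (matrix : List (List Int)) (n m x y : Int) (z : Int × Int) :
    (∃ d ∈ pvAdirs, (0 ≤ x + d.1 ∧ x + d.1 < n ∧ 0 ≤ y + d.2 ∧ y + d.2 < m ∧
        pvCell matrix (x + d.1) (y + d.2) = 0) ∧ z = (x + d.1, y + d.2))
      ↔ pvAdj matrix n m (x, y) z := by
  constructor
  · rintro ⟨d, hd, hc, rfl⟩
    refine ⟨⟨hc.1, hc.2.1, hc.2.2.1, hc.2.2.2.1, hc.2.2.2.2⟩, ?_⟩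
    have : (x + d.1 - x, y + d.2 - y) = d := by obtain ⟨d1, d2⟩ := d; simp
    simpa [this] using hd
  · rintro ⟨hok, hd⟩
    refine ⟨(z.1 - x, z.2 - y), hd, ?_, ?_⟩
    · obtain ⟨hz1, hz2, hz3, hz4, hz5⟩ := hok
      constructor
      · omega
      refine ⟨by omega, by omega, by omega, ?_⟩
      have h1 : x + (z.1 - x) = z.1 := by omega
      have h2 : y + (z.2 - y) = z.2 := by omega
      rw [h1, h2]; exact hz5
    · obtain ⟨z1, z2⟩ := z; simp

def pvInv (matrix : List (List Int)) (n m : Int) (q : List (Int × Int))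
    (vis : PySem.Set (Int × Int)) : Prop :=
  vis.Nodup ∧ (∀ p ∈ q, p ∈ vis) ∧ (∀ p ∈ vis, pvOk matrix n m p) ∧
  (∀ p ∈ vis, pvReach matrix n m p) ∧
  (∀ p ∈ vis, p ∉ q → ∀ r, pvAdj matrix n m p r → r ∈ vis) ∧
  (∀ s, pvSeedP matrix n m s → s ∈ vis)

lemma pvAbfs_fold_spec (matrix : List (List Int)) (n m x y : Int) :
    pvPS (fun st => pvAdirs.foldl (fun (st : List (Int × Int) × PySem.Set (Int × Int)) d =>
        if (0 ≤ x + d.1 ∧ x + d.1 < n ∧ 0 ≤ y + d.2 ∧ y + d.2 < m ∧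
            pvCell matrix (x + d.1) (y + d.2) = 0) ∧ (x + d.1, y + d.2) ∉ st.2 then
          (st.1 ++ [(x + d.1, y + d.2)], PySem.Set.add st.2 (x + d.1, y + d.2))
        else st) st)
      (fun z => pvAdj matrix n m (x, y) z) := by
  refine pvPS_congr (fun z => ?_)
    (pvPS_foldl _ (fun d z => (0 ≤ x + d.1 ∧ x + d.1 < n ∧ 0 ≤ y + d.2 ∧ y + d.2 < m ∧
      pvCell matrix (x + d.1) (y + d.2) = 0) ∧ z = (x + d.1, y + d.2))
      (fun d => pvPS_step _ _) pvAdirs)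
  exact pvAdjFrom_iff matrix n m x y z

lemma pvAbfs_char (matrix : List (List Int)) (n m : Int) :
    ∀ (fuel : Nat) (q : List (Int × Int)) (vis : PySem.Set (Int × Int)),
      pvInv matrix n m q vis →
      2 * ((pvGrid n m).length - vis.length) + q.length < fuel →
      ∀ z, z ∈ pvAbfs matrix n m fuel q vis ↔ pvReach matrix n m z := by
  intro fuel
  induction fuel with
  | zero => intro q vis _ h z; exact absurd h (Nat.not_lt_zero _)
  | succ fuel ih =>
    intro q vis hinv hfuel z
    obtain ⟨hnd, hqv, hok, hreach, hclosed, hseed⟩ := hinv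
    rcases q with _ | ⟨⟨x, y⟩, rest⟩
    · show z ∈ vis ↔ _
      constructor
      · exact fun h => hreach z h
      · rintro ⟨s, hs, hrtg⟩
        induction hrtg with
        | refl => exact hseed s hs
        | tail hab hbc ihh => exact hclosed _ ihh (by simp) _ hbc
    · obtain ⟨e, he, hnd', hmem⟩ := pvAbfs_fold_spec matrix n m x y (rest, vis) hnd
      simp only at he hnd' hmem
      have hxy : (x, y) ∈ vis := hqv _ (by simp)
      rw [pvAbfs, he]
      show z ∈ pvAbfs matrix n m fuel (rest ++ e) (vis ++ e) ↔ _
      have hInv' : pvInv matrix n m (rest ++ e) (vis ++ e) := by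
        refine ⟨hnd', ?_, ?_, ?_, ?_, ?_⟩
        · intro p hp
          rcases List.mem_append.1 hp with h | h
          · exact List.mem_append_left _ (hqv p (by simp [h]))
          · exact List.mem_append_right _ h
        · intro p hp
          rcases (hmem p).1 hp with h | h
          · exact hok p h
          · exact h.1
        · intro p hp
          rcases (hmem p).1 hp with h | h
          · exact hreach p h
          · obtain ⟨s, hs, hrtg⟩ := hreach _ hxy
            exact ⟨s, hs, hrtg.tail h⟩
        · intro p hp hpq r har
          rcases List.mem_append.1 hp with h | h
          · by_cases hpxy : p = (x, y)
            · subst hpxy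
              exact (hmem r).2 (Or.inr har)
            · have hnrest : p ∉ (x, y) :: rest := by
                intro hc
                rcases List.mem_cons.1 hc with h' | h'
                · exact hpxy h'
                · exact hpq (List.mem_append_left _ h')
              exact List.mem_append_left _ (hclosed p h hnrest r har)
          · exact absurd (List.mem_append_right _ h) hpq
        · intro s hs
          exact List.mem_append_left _ (hseed s hs)
      have hlen : (vis ++ e).length ≤ (pvGrid n m).length :=
        pv_vis_le matrix n m _ hnd' hInv'.2.2.1
      refine ih (rest ++ e) (vis ++ e) hInv' ?_ z
      have h1 : (rest ++ e).length = rest.length + e.length := List.length_append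
      have h2 : (vis ++ e).length = vis.length + e.length := List.length_append
      simp only [List.length_cons] at hfuel
      omega

-- ---------- B's seeding, step and iteration ----------

lemma pvBseeds_char (matrix : List (List Int)) (n m : Int) :
    (pvBseeds matrix n m).Nodup ∧
      ∀ z, z ∈ pvBseeds matrix n m ↔ pvSeedP matrix n m z := by
  have hss := pvSS_foldl
    (fun s p => if pvCell matrix p.1 p.2 = 0 ∧ (p.1 = 0 ∨ p.1 = n - 1 ∨ p.2 = 0 ∨ p.2 = m - 1) then
        PySem.Set.add s p else s)
    (fun p z => (pvCell matrix p.1 p.2 = 0 ∧ (p.1 = 0 ∨ p.1 = n - 1 ∨ p.2 = 0 ∨ p.2 = m - 1)) ∧ z = p)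
    (fun p => pvSS_step _ _) (pvGrid n m)
  obtain ⟨e, he, hnd, hm'⟩ := hss [] (by simp)
  have heq : pvBseeds matrix n m = [] ++ e := he
  constructor
  · rw [heq]; exact hnd
  · intro z
    rw [heq, hm' z]
    simp only [List.not_mem_nil, false_or]
    constructor
    · rintro ⟨p, hp, ⟨hc, hb⟩, rfl⟩
      have := (mem_pvGrid n m z).1 hp
      exact ⟨⟨this.1, this.2.1, this.2.2.1, this.2.2.2, hc⟩, hb⟩
    · rintro ⟨⟨h1, h2, h3, h4, h5⟩, hb⟩
      exact ⟨z, (mem_pvGrid n m z).2 ⟨h1, h2, h3, h4⟩, ⟨h5, hb⟩, rfl⟩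

lemma pvBexp_iff (matrix : List (List Int)) (n m : Int) (p z : Int × Int) :
    (∃ d ∈ pvBdeltas, (0 ≤ p.1 + d.1 ∧ p.1 + d.1 < n ∧ 0 ≤ p.2 + d.2 ∧ p.2 + d.2 < m ∧
        pvCell matrix (p.1 + d.1) (p.2 + d.2) = 0) ∧ z = (p.1 + d.1, p.2 + d.2))
      ↔ (pvAdj matrix n m p z ∨ (pvOk matrix n m z ∧ z = p)) := by
  obtain ⟨p1, p2⟩ := p
  constructor
  · rintro ⟨⟨d1, d2⟩, hd, hc, rfl⟩
    rw [mem_pvBdeltas_iff] at hd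
    simp only at hd hc
    have hok : pvOk matrix n m (p1 + d1, p2 + d2) :=
      ⟨hc.1, hc.2.1, hc.2.2.1, hc.2.2.2.1, hc.2.2.2.2⟩
    by_cases h0 : d1 = 0 ∧ d2 = 0
    · right
      exact ⟨hok, by simp [Prod.ext_iff]; omega⟩
    · left
      refine ⟨hok, ?_⟩
      rw [mem_pvAdirs_iff]
      simp only
      omega
  · rintro (⟨hok, hd⟩ | ⟨hok, rfl⟩)
    · rw [mem_pvAdirs_iff] at hd
      obtain ⟨z1, z2⟩ := z
      obtain ⟨h1, h2, h3, h4, h5⟩ := hok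
      simp only at h1 h2 h3 h4 h5 hd
      refine ⟨(z1 - p1, z2 - p2), ?_, ?_, ?_⟩
      · rw [mem_pvBdeltas_iff]; simp only; omega
      · have e1 : p1 + (z1 - p1) = z1 := by omega
        have e2 : p2 + (z2 - p2) = z2 := by omega
        simp only [e1, e2]
        exact ⟨h1, h2, h3, h4, h5⟩
      · simp
    · obtain ⟨h1, h2, h3, h4, h5⟩ := hok
      simp only at h1 h2 h3 h4 h5
      refine ⟨(0, 0), ?_, ?_, ?_⟩
      · rw [mem_pvBdeltas_iff]; simp
      · simp only [add_zero]
        exact ⟨h1, h2, h3, h4, h5⟩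
      · simp

lemma pvBstep_char (matrix : List (List Int)) (n m : Int) (S : PySem.Set (Int × Int))
    (hS : S.Nodup) :
    ∃ e, pvBstep matrix n m S = S ++ e ∧ (S ++ e).Nodup ∧
      ∀ z, z ∈ S ++ e ↔ z ∈ S ∨ ∃ p ∈ S, pvAdj matrix n m p z ∨ (pvOk matrix n m z ∧ z = p) := by
  have hss := pvSS_foldl
    (fun acc p => pvBdeltas.foldl (fun acc d =>
      if 0 ≤ p.1 + d.1 ∧ p.1 + d.1 < n ∧ 0 ≤ p.2 + d.2 ∧ p.2 + d.2 < m ∧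
          pvCell matrix (p.1 + d.1) (p.2 + d.2) = 0 then
        PySem.Set.add acc (p.1 + d.1, p.2 + d.2)
      else acc) acc)
    (fun p z => ∃ d ∈ pvBdeltas, (0 ≤ p.1 + d.1 ∧ p.1 + d.1 < n ∧ 0 ≤ p.2 + d.2 ∧ p.2 + d.2 < m ∧
        pvCell matrix (p.1 + d.1) (p.2 + d.2) = 0) ∧ z = (p.1 + d.1, p.2 + d.2))
    (fun p => pvSS_foldl _
      (fun d z => (0 ≤ p.1 + d.1 ∧ p.1 + d.1 < n ∧ 0 ≤ p.2 + d.2 ∧ p.2 + d.2 < m ∧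
        pvCell matrix (p.1 + d.1) (p.2 + d.2) = 0) ∧ z = (p.1 + d.1, p.2 + d.2))
      (fun d => pvSS_step _ _) pvBdeltas) S
  obtain ⟨e, he, hnd, hm'⟩ := hss S hS
  refine ⟨e, he, hnd, fun z => ?_⟩
  rw [hm' z]
  constructor
  · rintro (h | ⟨p, hp, hq⟩)
    · exact Or.inl h
    · exact Or.inr ⟨p, hp, (pvBexp_iff matrix n m p z).1 hq⟩
  · rintro (h | ⟨p, hp, hq⟩)
    · exact Or.inl h
    · exact Or.inr ⟨p, hp, (pvBexp_iff matrix n m p z).2 hq⟩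

def pvBInv (matrix : List (List Int)) (n m : Int) (S : PySem.Set (Int × Int)) : Prop :=
  S.Nodup ∧ ∀ p ∈ S, pvOk matrix n m p ∧ pvReach matrix n m p

lemma pvBstep_inv (matrix : List (List Int)) (n m : Int) (S : PySem.Set (Int × Int))
    (h : pvBInv matrix n m S) : pvBInv matrix n m (pvBstep matrix n m S) := by
  obtain ⟨e, he, hnd, hm'⟩ := pvBstep_char matrix n m S h.1
  rw [he]
  refine ⟨hnd, fun p hp => ?_⟩
  rcases (hm' p).1 hp with hold | ⟨p', hp', hadj | ⟨hok, rfl⟩⟩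
  · exact h.2 p hold
  · obtain ⟨s, hs, hrtg⟩ := (h.2 p' hp').2
    exact ⟨hadj.1, s, hs, hrtg.tail hadj⟩
  · exact ⟨hok, (h.2 p hp').2⟩

lemma pvBiter_inv (matrix : List (List Int)) (n m : Int) (k : Nat) (S : PySem.Set (Int × Int))
    (h : pvBInv matrix n m S) : pvBInv matrix n m (pvBiter matrix n m k S) := by
  induction k generalizing S with
  | zero => exact h
  | succ k ih => exact ih _ (pvBstep_inv _ _ _ _ h)

lemma pvBiter_fixed (matrix : List (List Int)) (n m : Int) (k : Nat) (S : PySem.Set (Int × Int))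
    (h : pvBstep matrix n m S = S) : pvBiter matrix n m k S = S := by
  induction k with
  | zero => rfl
  | succ k ih => show pvBiter matrix n m k (pvBstep matrix n m S) = S; rw [h]; exact ih

lemma pvBiter_split (matrix : List (List Int)) (n m : Int) (i j : Nat) (S : PySem.Set (Int × Int)) :
    pvBiter matrix n m (i + j) S = pvBiter matrix n m j (pvBiter matrix n m i S) := by
  induction i generalizing S with
  | zero => simp [pvBiter]
  | succ i ih =>
      show pvBiter matrix n m (i + 1 + j) S = _
      have : i + 1 + j = (i + j) + 1 := by omega
      rw [this]
      show pvBiter matrix n m (i + j) (pvBstep matrix n m S) = _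
      rw [ih]
      rfl

lemma pvBiter_succ' (matrix : List (List Int)) (n m : Int) (k : Nat) (S : PySem.Set (Int × Int)) :
    pvBiter matrix n m (k + 1) S = pvBstep matrix n m (pvBiter matrix n m k S) :=
  pvBiter_split matrix n m k 1 S

lemma pvBiter_mono (matrix : List (List Int)) (n m : Int) (k : Nat) (S : PySem.Set (Int × Int))
    (h : pvBInv matrix n m S) : ∀ z ∈ S, z ∈ pvBiter matrix n m k S := by
  induction k generalizing S with
  | zero => exact fun z hz => hz
  | succ k ih =>
      intro z hz
      obtain ⟨e, he, _, _⟩ := pvBstep_char matrix n m S h.1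
      exact ih _ (pvBstep_inv _ _ _ _ h) z (by rw [he]; exact List.mem_append_left _ hz)

lemma pvBiter_growth (matrix : List (List Int)) (n m : Int) (S : PySem.Set (Int × Int))
    (h : pvBInv matrix n m S) :
    ∀ k, (∀ j < k, pvBstep matrix n m (pvBiter matrix n m j S) ≠ pvBiter matrix n m j S) →
      S.length + k ≤ (pvBiter matrix n m k S).length := by
  intro k
  induction k with
  | zero => exact fun _ => by simp [pvBiter]
  | succ k ih =>
      intro hne
      have hk := ih (fun j hj => hne j (by omega))
      have hinv := pvBiter_inv matrix n m k S h
      obtain ⟨e, he, _, _⟩ := pvBstep_char matrix n m _ hinv.1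
      have hene : e ≠ [] := by
        intro h0
        exact hne k (by omega) (by rw [he, h0, List.append_nil])
      have : 1 ≤ e.length := by
        cases e with
        | nil => exact absurd rfl hene
        | cons _ _ => simp
      rw [pvBiter_succ', he]
      simp only [List.length_append]
      omega

lemma pvBfinal_char (matrix : List (List Int)) (n m : Int) (cnt : Nat)
    (hcnt1 : 1 ≤ cnt) (hcnt2 : (pvGrid n m).length ≤ cnt) :
    ∀ z, z ∈ pvBiter matrix n m cnt (pvBseeds matrix n m) ↔ pvReach matrix n m z := by
  obtain ⟨hnd0, hmem0⟩ := pvBseeds_char matrix n m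
  have hinv0 : pvBInv matrix n m (pvBseeds matrix n m) :=
    ⟨hnd0, fun p hp => ⟨((hmem0 p).1 hp).1, ⟨p, (hmem0 p).1 hp, Relation.ReflTransGen.refl⟩⟩⟩
  have hfix : ∃ j, j < cnt ∧
      pvBstep matrix n m (pvBiter matrix n m j (pvBseeds matrix n m)) =
        pvBiter matrix n m j (pvBseeds matrix n m) := by
    by_contra hcon
    push Not at hcon
    have hgrow := pvBiter_growth matrix n m _ hinv0 cnt (fun j hj => hcon j hj)
    have hinvc := pvBiter_inv matrix n m cnt _ hinv0
    have hle := pv_vis_le matrix n m _ hinvc.1 (fun p hp => (hinvc.2 p hp).1)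
    have hS0len : (pvBseeds matrix n m).length = 0 := by omega
    have hS0nil : pvBseeds matrix n m = [] := List.eq_nil_of_length_eq_zero hS0len
    refine hcon 0 hcnt1 ?_
    show pvBstep matrix n m (pvBseeds matrix n m) = pvBseeds matrix n m
    rw [hS0nil]
    rfl
  obtain ⟨j, hj, hfixj⟩ := hfix
  have hfull : pvBiter matrix n m cnt (pvBseeds matrix n m) =
      pvBiter matrix n m j (pvBseeds matrix n m) := by
    have hsplit : cnt = j + (cnt - j) := by omega
    rw [hsplit, pvBiter_split]
    exact pvBiter_fixed _ _ _ _ _ hfixj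
  have hinvR := pvBiter_inv matrix n m j _ hinv0
  intro z
  rw [hfull]
  constructor
  · exact fun h => (hinvR.2 z h).2
  · rintro ⟨s, hs, hrtg⟩
    obtain ⟨e, he, hnde, hm'⟩ := pvBstep_char matrix n m _ hinvR.1
    have he0 : pvBiter matrix n m j (pvBseeds matrix n m) ++ e =
        pvBiter matrix n m j (pvBseeds matrix n m) := by rw [← he, hfixj]
    induction hrtg with
    | refl => exact pvBiter_mono matrix n m j _ hinv0 s ((hmem0 s).2 hs)
    | tail hab hbc ihh =>
        have hmem := (hm' _).2 (Or.inr ⟨_, ihh, Or.inl hbc⟩)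
        rwa [he0] at hmem

-- ---------- the common final scan ----------

lemma pvScan_congr (matrix : List (List Int)) (V W : PySem.Set (Int × Int))
    (h : ∀ p, p ∈ V ↔ p ∈ W) : ∀ l, pvScan matrix V l = pvScan matrix W l := by
  intro l
  induction l with
  | nil => rfl
  | cons p rest ih =>
      simp only [pvScan]
      rw [ih]
      by_cases hc : pvCell matrix p.1 p.2 = 0 ∧ p ∉ V
      · rw [if_pos hc, if_pos ⟨hc.1, fun hw => hc.2 ((h p).2 hw)⟩]
      · rw [if_neg hc, if_neg (fun hw => hc ⟨hw.1, fun hv => hw.2 ((h p).1 hv)⟩)]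


-- ===== VERDICT (by name: the statement is the Claim_ definition above) =====
theorem has_closed_contour_spec : Claim_equal_has_closed_contour := by
  intro matrix _ hpre
  obtain ⟨hne, hb0, hrows⟩ := hpre
  unfold Spec_has_closed_contour
  have ha0 : 0 < matrix.length := List.length_pos_iff.2 hne
  have hn0 : 0 < (matrix.length : Int) := by exact_mod_cast ha0
  have hm0 : 0 < ((matrix.headI).length : Int) := by exact_mod_cast hb0
  obtain ⟨v, hv, hvnd, hvmem⟩ := pvAseed_char matrix _ _ hn0 hm0
  have hInv : pvInv matrix (matrix.length : Int) ((matrix.headI).length : Int) v v :=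
    ⟨hvnd, fun p hp => hp, fun p hp => ((hvmem p).1 hp).1,
     fun p hp => ⟨p, (hvmem p).1 hp, Relation.ReflTransGen.refl⟩,
     fun p hp hnp => absurd hp hnp, fun s hs => (hvmem s).2 hs⟩
  have hvle := pv_vis_le matrix (matrix.length : Int) ((matrix.headI).length : Int) v hvnd
    (fun p hp => ((hvmem p).1 hp).1)
  have hA := pvAbfs_char matrix (matrix.length : Int) ((matrix.headI).length : Int)
    (2 * (pvGrid (matrix.length : Int) ((matrix.headI).length : Int)).length + 1) v v hInv
    (by omega)
  have hab : ((matrix.length : Int) * ((matrix.headI).length : Int)).toNat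
      = matrix.length * (matrix.headI).length := by
    rw [← Nat.cast_mul, Int.toNat_natCast]
  have hgr := length_pvGrid matrix.length (matrix.headI).length
  have hB := pvBfinal_char matrix (matrix.length : Int) ((matrix.headI).length : Int)
    (((matrix.length : Int) * ((matrix.headI).length : Int)).toNat)
    (by rw [hab]; exact Nat.mul_pos ha0 hb0)
    (by rw [hab, hgr])
  simp only [has_closed_contour, has_closed_contour_alt]
  rw [hv]
  exact pvScan_congr matrix _ _ (fun p => (hA p).trans ((hB p).symm)) _
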